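-- pv_equiv track=rewrite | github.com/SciPost/SciPost | scipost_django/common/utils/text.py | jatsify_tags
-- ===== SOURCE A (Python) =====
-- def jatsify_tags(text):
--     """
--     Adds the `jats:` prefix to basic HTML tags. Nilpotent.
--     """
--     tags = ["alternatives", "p", "inline-formula", "tex-math"]
--     jatsified = text
--     for tag in tags:
--         jatsified = jatsified.replace(f"<{tag}>", f"<jats:{tag}>").replace(
--             f"</{tag}>", f"</jats:{tag}>"
--         )
--     return jatsified
-- ===== SOURCE B (Python) =====
-- def jatsify_tags(text):
--     """
--     Adds the `jats:` prefix to basic HTML tags. Nilpotent.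
--     Single left-to-right scan: each bare open/close tag is rewritten once in place.
--     """
--     pats = []
--     for tag in ["alternatives", "p", "inline-formula", "tex-math"]:
--         for slash in ("", "/"):
--             pats.append(("<%s%s>" % (slash, tag), "<%sjats:%s>" % (slash, tag)))
--     out = []
--     i = 0
--     while i < len(text):
--         for pat, repl in pats:
--             if text.startswith(pat, i):
--                 out.append(repl)
--                 i += len(pat)
--                 break
--         else:
--             out.append(text[i])
--             i += 1
--     return "".join(out)
-- ===== Notes on version B (the rewrite author's own statement) =====
-- stated objective: alternative
-- what changed: Replaces A's eight sequential full-string str.replace passes by a single left-to-right scan that at each position matches one of the eight literal tag patterns (emitting its jats: replacement) or copies the character.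
import Mathlib
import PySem

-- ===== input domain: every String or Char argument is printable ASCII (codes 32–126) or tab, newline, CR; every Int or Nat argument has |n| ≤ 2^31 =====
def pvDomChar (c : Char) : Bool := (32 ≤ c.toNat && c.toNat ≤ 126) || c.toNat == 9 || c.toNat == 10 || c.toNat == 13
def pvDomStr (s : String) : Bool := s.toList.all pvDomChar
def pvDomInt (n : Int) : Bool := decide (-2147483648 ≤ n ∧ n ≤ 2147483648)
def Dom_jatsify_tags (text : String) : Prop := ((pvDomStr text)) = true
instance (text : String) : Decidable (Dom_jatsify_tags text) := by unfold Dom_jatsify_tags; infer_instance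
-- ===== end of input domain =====

-- B replaces A's eight sequential str.replace passes by one left-to-right scan matching the eight
-- literal tag patterns; same return value, alternative single-pass structure.

-- ===== PORT A =====
def jatsify_tags (text : String) : String :=
  ["alternatives", "p", "inline-formula", "tex-math"].foldl
    (fun jatsified tag =>
      PySem.Str.replace
        (PySem.Str.replace jatsified ("<" ++ tag ++ ">") ("<jats:" ++ tag ++ ">"))
        ("</" ++ tag ++ ">") ("</jats:" ++ tag ++ ">"))
    text

-- ===== PORT B =====
-- the (pattern, replacement) pairs Source B builds from the tag list, in the same order
def jatsPats : List (List Char × List Char) :=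
  ["alternatives", "p", "inline-formula", "tex-math"].foldl
    (fun pats tag =>
      ["", "/"].foldl
        (fun pats slash =>
          pats ++ [(("<" ++ slash ++ tag ++ ">").toList,
                    ("<" ++ slash ++ "jats:" ++ tag ++ ">").toList)])
        pats)
    []

-- Source B's while loop: at each position emit the replacement of the first matching pattern
-- (and skip it), else copy one character
def jatsScan (pats : List (List Char × List Char)) : List Char → List Char
  | [] => []
  | c :: t =>
    match pats.find? (fun pq => pq.1.isPrefixOf (c :: t)) with
    | some pq => pq.2 ++ jatsScan pats (t.drop (pq.1.length - 1))
    | none => c :: jatsScan pats t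
termination_by s => s.length
decreasing_by
  all_goals simp

def jatsify_tags_alt (text : String) : String :=
  String.ofList (jatsScan jatsPats text.toList)

-- ===== PRECONDITION & SPEC =====
def Spec_jatsify_tags (text : String) (out : String) : Prop := out = jatsify_tags_alt text
instance (text : String) (out : String) : Decidable (Spec_jatsify_tags text out) := by unfold Spec_jatsify_tags; infer_instance

-- ===== CLAIM (what is proved, stated in full; the proofs are below) =====
def Claim_equal_jatsify_tags : Prop := ∀ (text : String), Dom_jatsify_tags text → Spec_jatsify_tags text (jatsify_tags text)

-- ===== LEMMAS AND PROOFS =====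

-- proof-side model of one Python str.replace pass (for a nonempty pattern)
def pvRep (p q : List Char) : List Char → List Char
  | [] => []
  | c :: t =>
    if p.isPrefixOf (c :: t) then q ++ pvRep p q (t.drop (p.length - 1))
    else c :: pvRep p q t
termination_by s => s.length
decreasing_by
  all_goals simp

lemma pvRep_nil (p q : List Char) : pvRep p q [] = [] := by simp [pvRep]

lemma pvRep_cons_pos (p q : List Char) (c : Char) (t : List Char)
    (h : p.isPrefixOf (c :: t) = true) :
    pvRep p q (c :: t) = q ++ pvRep p q (t.drop (p.length - 1)) := by
  rw [pvRep]; simp [h]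

lemma pvRep_cons_neg (p q : List Char) (c : Char) (t : List Char)
    (h : ¬ p.isPrefixOf (c :: t) = true) :
    pvRep p q (c :: t) = c :: pvRep p q t := by
  rw [pvRep]; simp [h]

lemma pv_go_eq (p q : List Char) (hp : p ≠ []) :
    ∀ (fuel : Nat) (s acc : List Char), s.length ≤ fuel →
      PySem.Chars.replace.go p q fuel s acc = acc.reverse ++ pvRep p q s := by
  intro fuel
  induction fuel with
  | zero =>
    intro s acc hs
    have : s = [] := List.eq_nil_of_length_eq_zero (Nat.le_zero.mp hs)
    subst this
    simp [PySem.Chars.replace.go, pvRep_nil]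
  | succ n ih =>
    intro s acc hs
    cases s with
    | nil => simp [PySem.Chars.replace.go, pvRep_nil]
    | cons c t =>
      rw [PySem.Chars.replace.go]
      by_cases h : p.isPrefixOf (c :: t) = true
      · have hplen : 1 ≤ p.length := by
          cases p with
          | nil => exact absurd rfl hp
          | cons a w => simp
        have hdrop : (c :: t).drop p.length = t.drop (p.length - 1) := by
          have hplen' : p.length = (p.length - 1) + 1 := by omega
          conv_lhs => rw [hplen']
          rw [List.drop_succ_cons]
        have hlen : ((c :: t).drop p.length).length ≤ n := by
          simp at hs ⊢
          omega
        simp only [h, if_true]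
        rw [ih _ _ hlen, pvRep_cons_pos p q c t h, hdrop]
        simp
      · have hlen : t.length ≤ n := by simp at hs; omega
        simp only [h]
        rw [ih _ _ hlen, pvRep_cons_neg p q c t h]
        simp

lemma pv_replace_eq (s p q : List Char) (hp : p ≠ []) :
    PySem.Chars.replace s p q = pvRep p q s := by
  have hne : p.isEmpty = false := by simp; exact hp
  rw [PySem.Chars.replace, hne]
  simpa using pv_go_eq p q hp s.length s [] (le_refl _)

lemma pv_prefix_head {a : Char} {w l : List Char} (h : (a :: w) <+: l) :
    l.head? = some a := by
  obtain ⟨r, rfl⟩ := h; rfl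

lemma pv_prefix_split {p u v : List Char} (h : p <+: u ++ v) : p <+: u ∨ u <+: p :=
  List.prefix_or_prefix_of_prefix h (u.prefix_append v)

lemma pv_no_inner (p' u v : List Char) (hh : p'.head? = some '<')
    (h0 : ¬ p' <+: u ++ v) (ht : ∀ c ∈ u.tail, c ≠ '<') :
    ∀ j, j < u.length → ¬ p' <+: (u ++ v).drop j := by
  intro j hj contra
  cases j with
  | zero => exact h0 (by simpa using contra)
  | succ k =>
    cases p' with
    | nil => simp at hh
    | cons a w =>
      have ha : a = '<' := by simpa using hh
      cases u with
      | nil => simp at hj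
      | cons x u' =>
        have hk : k < u'.length := by simpa using hj
        have hhead : ((x :: u' ++ v).drop (k + 1)).head? = some a := pv_prefix_head contra
        have : ((x :: u' ++ v).drop (k + 1)).head? = (u' ++ v)[k]? := by
          simp [List.head?_drop]
        rw [this, List.getElem?_append_left hk] at hhead
        have hmem : u'[k] ∈ u' := List.getElem_mem hk
        have := ht u'[k] (by simp)
        rw [List.getElem?_eq_getElem hk] at hhead
        simp at hhead
        exact this (hhead ▸ ha ▸ rfl)

lemma pvRep_push (p' q' u : List Char) (v : List Char)
    (h : ∀ j, j < u.length → ¬ p' <+: (u ++ v).drop j) :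
    pvRep p' q' (u ++ v) = u ++ pvRep p' q' v := by
  induction u generalizing v with
  | nil => simp
  | cons c u' ih =>
    have hc : ¬ p'.isPrefixOf (c :: (u' ++ v)) = true := by
      have := h 0 (by simp)
      simpa [List.isPrefixOf_iff_prefix] using this
    rw [List.cons_append, pvRep_cons_neg _ _ _ _ hc]
    rw [ih v (fun j hj contra => h (j + 1) (by simpa using Nat.succ_lt_succ hj)
      (by simpa [List.drop_succ_cons] using contra))]
    simp

lemma pvRep_pres (p q : List Char) (hq : q.head? = some '<') :
    ∀ (n : Nat) (t : List Char), t.length ≤ n →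
      ∀ w, ¬ w <+: t → '<' ∉ w → ¬ w <+: pvRep p q t := by
  intro n
  induction n with
  | zero =>
    intro t ht w hw _
    have : t = [] := List.eq_nil_of_length_eq_zero (Nat.le_zero.mp ht)
    subst this
    simpa [pvRep_nil] using hw
  | succ m ih =>
    intro t ht w hw hmem
    cases t with
    | nil => simpa [pvRep_nil] using hw
    | cons c t' =>
      by_cases h : p.isPrefixOf (c :: t') = true
      · rw [pvRep_cons_pos p q c t' h]
        intro contra
        cases w with
        | nil => exact hw (List.nil_prefix)
        | cons a w' =>
          cases q with
          | nil => simp at hq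
          | cons b q' =>
            have hb : b = '<' := by simpa using hq
            have : a = b := by
              have := pv_prefix_head contra
              simpa using this.symm
            exact hmem (by simp [this, hb])
      · rw [pvRep_cons_neg p q c t' h]
        intro contra
        cases w with
        | nil => exact hw (List.nil_prefix)
        | cons a w' =>
          obtain ⟨rfl, hw'⟩ := List.cons_prefix_cons.mp contra
          have hnw' : ¬ w' <+: t' := fun hx => hw (List.cons_prefix_cons.mpr ⟨rfl, hx⟩)
          have : t'.length ≤ m := by simp at ht; omega
          exact ih t' this w' hnw' (fun hx => hmem (List.mem_cons_of_mem _ hx)) hw'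

-- the hypotheses on the pattern list, all decidable on the literal list
def GoodL (L : List (List Char × List Char)) : Prop :=
  ∀ pq ∈ L,
    pq.1.head? = some '<' ∧ (∀ c ∈ pq.1.tail, c ≠ '<') ∧
    pq.2.head? = some '<' ∧ (∀ c ∈ pq.2.tail, c ≠ '<') ∧
    (∀ pq' ∈ L, (pq.1 <+: pq'.1 → pq.1 = pq'.1) ∧ ¬ pq.1 <+: pq'.2 ∧ ¬ pq'.2 <+: pq.1)

-- Bool form of GoodL, so the literal pattern list is checked by kernel evaluation
def goodB (L : List (List Char × List Char)) : Bool :=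
  L.all fun pq =>
    (pq.1.head? == some '<') && pq.1.tail.all (fun c => c != '<') &&
    (pq.2.head? == some '<') && pq.2.tail.all (fun c => c != '<') &&
    (L.all fun pq' => (!(pq.1.isPrefixOf pq'.1) || pq.1 == pq'.1)
      && !(pq.1.isPrefixOf pq'.2) && !(pq'.2.isPrefixOf pq.1))

lemma GoodL_of_goodB (L : List (List Char × List Char)) (h : goodB L = true) : GoodL L := by
  rw [goodB, List.all_eq_true] at h
  intro pq hm
  have hpq := h pq hm
  simp only [Bool.and_eq_true, List.all_eq_true, beq_iff_eq, bne_iff_ne,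
    Bool.or_eq_true, Bool.not_eq_true'] at hpq
  obtain ⟨⟨⟨⟨h1, h2⟩, h3⟩, h4⟩, h5⟩ := hpq
  refine ⟨h1, h2, h3, h4, ?_⟩
  intro pq' hm'
  obtain ⟨⟨himp, hb⟩, hc⟩ := h5 pq' hm'
  refine ⟨?_, ?_, ?_⟩
  · intro hx
    rcases himp with hf | he
    · rw [List.isPrefixOf_iff_prefix.mpr hx] at hf; exact absurd hf (by simp)
    · exact he
  · intro hx
    rw [List.isPrefixOf_iff_prefix.mpr hx] at hb; exact absurd hb (by simp)
  · intro hx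
    rw [List.isPrefixOf_iff_prefix.mpr hx] at hc; exact absurd hc (by simp)

lemma GoodL_tail {x : List Char × List Char} {L : List (List Char × List Char)}
    (h : GoodL (x :: L)) : GoodL L := by
  intro pq hm
  obtain ⟨h1, h2, h3, h4, h5⟩ := h pq (List.mem_cons_of_mem _ hm)
  exact ⟨h1, h2, h3, h4, fun pq' hm' => h5 pq' (List.mem_cons_of_mem _ hm')⟩

def chainRep (L : List (List Char × List Char)) (s : List Char) : List Char :=
  L.foldl (fun s pq => pvRep pq.1 pq.2 s) s

lemma chainRep_nil (L : List (List Char × List Char)) : chainRep L [] = [] := by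
  induction L with
  | nil => rfl
  | cons x L ih => simp [chainRep, List.foldl_cons, pvRep_nil] at ih ⊢; exact ih

lemma pv_head_ne_nil {p : List Char} (h : p.head? = some '<') : p ≠ [] := by
  intro hx; subst hx; simp at h

lemma chain_nonmatch (L : List (List Char × List Char)) (hL : GoodL L)
    (c : Char) (t : List Char) (h : ∀ pq ∈ L, ¬ pq.1 <+: c :: t) :
    chainRep L (c :: t) = c :: chainRep L t := by
  induction L generalizing t with
  | nil => rfl
  | cons x L ih =>
    obtain ⟨hx1, hx2, hx3, hx4, _⟩ := hL x (List.mem_cons_self)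
    have hxp : ¬ x.1.isPrefixOf (c :: t) = true := by
      simpa [List.isPrefixOf_iff_prefix] using h x (List.mem_cons_self)
    have step : ∀ pq ∈ L, ¬ pq.1 <+: c :: pvRep x.1 x.2 t := by
      intro pq hm contra
      obtain ⟨h1, h2, _, _, _⟩ := hL pq (List.mem_cons_of_mem _ hm)
      cases hp' : pq.1 with
      | nil => exact h pq (List.mem_cons_of_mem _ hm) (by simp [hp'])
      | cons a w =>
        rw [hp'] at contra
        obtain ⟨rfl, hw⟩ := List.cons_prefix_cons.mp contra
        have hnw : ¬ w <+: t := by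
          intro hx
          exact h pq (List.mem_cons_of_mem _ hm) (by rw [hp']; exact List.cons_prefix_cons.mpr ⟨rfl, hx⟩)
        have hmemw : '<' ∉ w := by
          intro hx
          have := h2 '<' (by simp [hp']; exact hx)
          exact this rfl
        exact pvRep_pres x.1 x.2 hx3 t.length t (le_refl _) w hnw hmemw hw
    have : chainRep (x :: L) (c :: t) = chainRep L (pvRep x.1 x.2 (c :: t)) := rfl
    rw [this, pvRep_cons_neg _ _ _ _ hxp, ih (GoodL_tail hL) _ step]
    rfl

lemma chain_push (L : List (List Char × List Char)) (u : List Char)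
    (h : ∀ pq ∈ L, ∀ v, pvRep pq.1 pq.2 (u ++ v) = u ++ pvRep pq.1 pq.2 v) :
    ∀ X, chainRep L (u ++ X) = u ++ chainRep L X := by
  induction L with
  | nil => intro X; rfl
  | cons x L ih =>
    intro X
    have : chainRep (x :: L) (u ++ X) = chainRep L (pvRep x.1 x.2 (u ++ X)) := rfl
    rw [this, h x List.mem_cons_self X,
      ih (fun pq hm => h pq (List.mem_cons_of_mem _ hm))]
    rfl

theorem chain_eq_scan (L : List (List Char × List Char)) (hL : GoodL L) :
    ∀ (n : Nat) (s : List Char), s.length ≤ n → chainRep L s = jatsScan L s := by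
  intro n
  induction n with
  | zero =>
    intro s hs
    have : s = [] := List.eq_nil_of_length_eq_zero (Nat.le_zero.mp hs)
    subst this
    rw [chainRep_nil, jatsScan]
  | succ m ih =>
    intro s hs
    cases s with
    | nil => rw [chainRep_nil, jatsScan]
    | cons c t =>
      cases hfind : L.find? (fun pq => pq.1.isPrefixOf (c :: t)) with
      | none =>
        have hnone : ∀ pq ∈ L, ¬ pq.1 <+: c :: t := by
          intro pq hm hx
          exact List.find?_eq_none.mp hfind pq hm (List.isPrefixOf_iff_prefix.mpr hx)
        rw [chain_nonmatch L hL c t hnone]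
        rw [jatsScan.eq_2, hfind]
        have : t.length ≤ m := by simp at hs; omega
        rw [ih t this]
      | some pq0 =>
        obtain ⟨hpred, L1, L2, hsplit, hL1⟩ := List.find?_eq_some_iff_append.mp hfind
        have hpref : pq0.1 <+: c :: t := List.isPrefixOf_iff_prefix.mp hpred
        have hmem0 : pq0 ∈ L := by rw [hsplit]; simp
        obtain ⟨hp0, hp0t, hq0, hq0t, hrel0⟩ := hL pq0 hmem0
        have hplen : 1 ≤ pq0.1.length := by
          cases hx : pq0.1 with
          | nil => exact absurd hx (pv_head_ne_nil hp0)
          | cons a w => simp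
        set v := t.drop (pq0.1.length - 1) with hv
        obtain ⟨r, hr⟩ := hpref
        have hr' : (c :: t).drop pq0.1.length = r := by rw [← hr, List.drop_left]
        have hv' : v = r := by
          have hlen : pq0.1.length = (pq0.1.length - 1) + 1 := by omega
          rw [hv, ← hr']
          conv_rhs => rw [hlen]
          rw [List.drop_succ_cons]
        have hs0 : c :: t = pq0.1 ++ v := by rw [hv', ← hr]
        -- every pattern earlier in the list pushes through pq0.1
        have hpushL1 : ∀ pq ∈ L1, ∀ v', pvRep pq.1 pq.2 (pq0.1 ++ v') = pq0.1 ++ pvRep pq.1 pq.2 v' := by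
          intro pq hm v'
          have hmL : pq ∈ L := by rw [hsplit]; simp [hm]
          obtain ⟨h1, _, _, _, hrel⟩ := hL pq hmL
          apply pvRep_push
          apply pv_no_inner pq.1 pq0.1 v' h1 ?_ hp0t
          intro hx
          have hne : ¬ pq.1 <+: c :: t := by
            intro hy
            have hb := hL1 pq hm
            rw [List.isPrefixOf_iff_prefix.mpr hy] at hb
            simp at hb
          rcases pv_prefix_split hx with h | h
          · exact hne ((((hrel pq0 hmem0).1 h) ▸ (⟨r, hr⟩ : pq0.1 <+: c :: t)))
          · exact hne ((((hrel0 pq hmL).1 h).symm ▸ (⟨r, hr⟩ : pq0.1 <+: c :: t)))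
        -- every pattern pushes through the replacement pq0.2
        have hpushL2 : ∀ pq ∈ L2, ∀ v', pvRep pq.1 pq.2 (pq0.2 ++ v') = pq0.2 ++ pvRep pq.1 pq.2 v' := by
          intro pq hm v'
          have hmL : pq ∈ L := by rw [hsplit]; simp [hm]
          obtain ⟨h1, _, _, _, hrel⟩ := hL pq hmL
          apply pvRep_push
          apply pv_no_inner pq.1 pq0.2 v' h1 ?_ hq0t
          intro hx
          rcases pv_prefix_split hx with h | h
          · exact (hrel pq0 hmem0).2.1 h
          · exact (hrel pq0 hmem0).2.2 h
        -- the matched pattern consumes itself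
        have hmatch : ∀ Z, pvRep pq0.1 pq0.2 (pq0.1 ++ Z) = pq0.2 ++ pvRep pq0.1 pq0.2 Z := by
          intro Z
          cases hx : pq0.1 with
          | nil => exact absurd hx (pv_head_ne_nil hp0)
          | cons a w =>
            have hpre : (a :: w).isPrefixOf (a :: (w ++ Z)) = true := by
              rw [List.isPrefixOf_iff_prefix]
              exact List.cons_prefix_cons.mpr ⟨rfl, w.prefix_append Z⟩
            rw [List.cons_append, pvRep_cons_pos _ _ _ _ hpre]
            simp
        have hvlen : v.length ≤ m := by
          have : v.length ≤ t.length := by rw [hv]; simp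
          simp at hs
          omega
        have hfold : chainRep L (c :: t) = chainRep L2 (pvRep pq0.1 pq0.2 (chainRep L1 (c :: t))) := by
          rw [hsplit]
          simp [chainRep, List.foldl_append]
        have hfold2 : chainRep L2 (pvRep pq0.1 pq0.2 (chainRep L1 v)) = chainRep L v := by
          rw [hsplit]
          simp [chainRep, List.foldl_append]
        rw [jatsScan.eq_2, hfind]
        rw [hfold, hs0, chain_push L1 pq0.1 hpushL1 v, hmatch,
          chain_push L2 pq0.2 hpushL2, hfold2, ih v hvlen]

-- A's pattern/replacement pairs, written exactly as A's loop builds them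
def pvPatsA : List (List Char × List Char) :=
  ["alternatives", "p", "inline-formula", "tex-math"].foldl
    (fun pats tag =>
      pats ++ [(("<" ++ tag ++ ">").toList, ("<jats:" ++ tag ++ ">").toList),
               (("</" ++ tag ++ ">").toList, ("</jats:" ++ tag ++ ">").toList)]) []

lemma pvPatsA_eq : pvPatsA = jatsPats := by decide

-- A's eight replace passes, on the character-list side, are the pvRep chain over its pairs
lemma pvA_list (text : String) :
    (jatsify_tags text).toList = chainRep pvPatsA text.toList := by
  simp only [jatsify_tags, pvPatsA, chainRep, List.foldl_cons, List.foldl_nil,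
    List.nil_append, List.cons_append, PySem.Str.toList_replace]
  repeat rw [pv_replace_eq _ _ _ (by decide)]

lemma pvB_list (text : String) :
    (jatsify_tags_alt text).toList = jatsScan jatsPats text.toList := by
  simp [jatsify_tags_alt]

-- ===== VERDICT (by name: the statement is the Claim_ definition above) =====
theorem jatsify_tags_spec : Claim_equal_jatsify_tags := by
  intro text _
  unfold Spec_jatsify_tags
  have hL : GoodL jatsPats := GoodL_of_goodB jatsPats (by decide)
  have h : (jatsify_tags text).toList = (jatsify_tags_alt text).toList := by
    rw [pvA_list, pvPatsA_eq, pvB_list]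
    exact chain_eq_scan jatsPats hL text.toList.length text.toList (le_refl _)
  calc jatsify_tags text = String.ofList (jatsify_tags text).toList := String.ofList_toList.symm
    _ = String.ofList (jatsify_tags_alt text).toList := by rw [h]
    _ = jatsify_tags_alt text := String.ofList_toList
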